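-- pv_equiv track=rewrite | github.com/yomihime/CharaPicker | utils/ai_model_middleware.py | _dashscope_api_url
-- ===== SOURCE A (Python) =====
-- def _dashscope_api_url(base_url: str) -> str:
--     base_url = base_url.strip().rstrip("/")
--     if not base_url:
--         return "https://dashscope.aliyuncs.com/api/v1"
--     if base_url.endswith("/compatible-mode/v1"):
--         return base_url[: -len("/compatible-mode/v1")] + "/api/v1"
--     if base_url.endswith("/chat/completions"):
--         return _dashscope_api_url(base_url[: -len("/chat/completions")])
--     if base_url.endswith("/api/v1"):
--         return base_url
--     return base_url
-- ===== SOURCE B (Python) =====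
-- def _dashscope_api_url(base_url: str) -> str:
--     # Iterative: peel every '/chat/completions' suffix in a loop, then apply the
--     # empty-default and compatible-mode transforms once.
--     base_url = base_url.strip().rstrip("/")
--     while base_url.endswith("/chat/completions"):
--         base_url = base_url[: -len("/chat/completions")].strip().rstrip("/")
--     if not base_url:
--         return "https://dashscope.aliyuncs.com/api/v1"
--     if base_url.endswith("/compatible-mode/v1"):
--         return base_url[: -len("/compatible-mode/v1")] + "/api/v1"
--     return base_url
-- ===== Notes on version B (the rewrite author's own statement) =====
-- stated objective: simpler
-- what changed: Replaces the self-recursion with an explicit while-loop that peels the strippable chat-completions suffix repeatedly (re-normalizing inside the loop), after which the empty-default and compatible-mode transforms run once and the redundant final suffix branch is dropped.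
import Mathlib
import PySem

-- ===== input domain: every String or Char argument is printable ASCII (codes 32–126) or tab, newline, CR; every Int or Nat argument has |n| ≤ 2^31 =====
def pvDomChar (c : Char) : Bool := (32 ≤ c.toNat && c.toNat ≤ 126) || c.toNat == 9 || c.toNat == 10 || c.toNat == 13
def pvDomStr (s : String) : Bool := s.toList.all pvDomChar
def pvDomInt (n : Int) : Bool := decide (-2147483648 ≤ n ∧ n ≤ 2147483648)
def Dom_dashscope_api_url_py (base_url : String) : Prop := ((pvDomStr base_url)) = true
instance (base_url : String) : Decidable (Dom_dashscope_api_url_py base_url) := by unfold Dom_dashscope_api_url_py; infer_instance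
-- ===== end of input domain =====

-- B replaces A's recursion by an explicit loop that peels every '/chat/completions' suffix
-- and then applies the empty-default and compatible-mode transforms once (simpler; same cost).

-- Python's s.rstrip("/"): PySem has no chars-argument rstrip, so this is a hand port
-- (exact: removes exactly the maximal run of trailing '/' characters).
def pvRstripSlash (cs : List Char) : List Char :=
  (cs.reverse.dropWhile (fun c => c == '/')).reverse

-- length facts the ports cite for termination
theorem pvRstripSlash_length_le (cs : List Char) : (pvRstripSlash cs).length ≤ cs.length := by
  simpa [pvRstripSlash] using
    le_trans (List.length_dropWhile_le (fun c => c == '/') cs.reverse) (by simp)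

theorem pvStrip_length_le (cs : List Char) : (PySem.Chars.strip cs).length ≤ cs.length := by
  simp only [PySem.Chars.strip, PySem.Chars.rstrip, PySem.Chars.lstrip]
  calc (List.dropWhile PySem.Chars.isspace (List.dropWhile PySem.Chars.isspace cs).reverse).reverse.length
      ≤ (List.dropWhile PySem.Chars.isspace cs).reverse.length := by
        simpa using List.length_dropWhile_le PySem.Chars.isspace (List.dropWhile PySem.Chars.isspace cs).reverse
    _ ≤ cs.length := by simpa using List.length_dropWhile_le PySem.Chars.isspace cs

theorem pvEndswith_length_le {b p : List Char} (h : PySem.Chars.endswith b p = true) :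
    p.length ≤ b.length := by
  exact List.IsSuffix.length_le ((List.isSuffixOf_iff_suffix).1 h)

-- the three suffix literals, as code-point lists
def pvCompatV1 : List Char := "/compatible-mode/v1".toList
def pvChatComp : List Char := "/chat/completions".toList
def pvApiV1 : List Char := "/api/v1".toList

-- ===== PORT A =====
-- A's recursive normalizer, on the code points (the String wrapper below converts once).
def dashscope_api_url_chars (cs : List Char) : String :=
  let b := pvRstripSlash (PySem.Chars.strip cs)
  if b = [] then "https://dashscope.aliyuncs.com/api/v1"
  else if PySem.Chars.endswith b pvCompatV1 then
    String.ofList (PySem.List.slice b none (some (-19)) ++ pvApiV1)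
  else if PySem.Chars.endswith b pvChatComp then
    dashscope_api_url_chars (PySem.List.slice b none (some (-17)))
  else if PySem.Chars.endswith b pvApiV1 then String.ofList b
  else String.ofList b
termination_by cs.length
decreasing_by
  rename_i hnil _ _
  have hb : (pvRstripSlash (PySem.Chars.strip cs)).length ≤ cs.length :=
    le_trans (pvRstripSlash_length_le _) (pvStrip_length_le _)
  have hpos : 0 < (pvRstripSlash (PySem.Chars.strip cs)).length :=
    List.length_pos_of_ne_nil hnil
  rw [PySem.List.slice_to_neg_ofNat _ 17 (by omega)]
  simp only [List.length_take]
  omega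

def dashscope_api_url_py (base_url : String) : String :=
  dashscope_api_url_chars base_url.toList

-- ===== PORT B =====
-- the while loop: keep peeling the '/chat/completions' suffix, re-normalizing each time
def dash_loop (b : List Char) : List Char :=
  if PySem.Chars.endswith b pvChatComp then
    dash_loop (pvRstripSlash (PySem.Chars.strip (PySem.List.slice b none (some (-17)))))
  else b
termination_by b.length
decreasing_by
  rename_i hchat
  have h17 : 17 ≤ b.length := by simpa using pvEndswith_length_le hchat
  rw [PySem.List.slice_to_neg_ofNat _ 17 (by omega)]
  calc (pvRstripSlash (PySem.Chars.strip (b.take (b.length - 17)))).length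
      ≤ (b.take (b.length - 17)).length :=
        le_trans (pvRstripSlash_length_le _) (pvStrip_length_le _)
    _ < b.length := by simp only [List.length_take]; omega

-- after the loop: the empty default, then the compatible-mode transform, else as is
def dash_post (b : List Char) : String :=
  if b = [] then "https://dashscope.aliyuncs.com/api/v1"
  else if PySem.Chars.endswith b pvCompatV1 then
    String.ofList (PySem.List.slice b none (some (-19)) ++ pvApiV1)
  else String.ofList b

def dashscope_api_url_py_alt (base_url : String) : String :=
  dash_post (dash_loop (pvRstripSlash (PySem.Chars.strip base_url.toList)))

-- ===== PRECONDITION & SPEC =====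
def Spec_dashscope_api_url_py (base_url : String) (out : String) : Prop := out = dashscope_api_url_py_alt base_url
instance (base_url : String) (out : String) : Decidable (Spec_dashscope_api_url_py base_url out) := by unfold Spec_dashscope_api_url_py; infer_instance

-- ===== CLAIM (what is proved, stated in full; the proofs are below) =====
def Claim_equal_dashscope_api_url_py : Prop := ∀ (base_url : String), Dom_dashscope_api_url_py base_url → Spec_dashscope_api_url_py base_url (dashscope_api_url_py base_url)

-- ===== LEMMAS AND PROOFS =====

-- a nonempty suffix fixes the last element
theorem pvEndswith_getLast? {b p : List Char} (h : PySem.Chars.endswith b p = true) (hp : p ≠ []) :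
    b.getLast? = p.getLast? := by
  obtain ⟨t, rfl⟩ := (List.isSuffixOf_iff_suffix).1 h
  simp [List.getLast?_append, List.getLast?_eq_none_iff.not.2 hp, Option.or_of_isSome,
    Option.isSome_iff_ne_none]

-- a string cannot end with both '/compatible-mode/v1' and '/chat/completions'
theorem pv_not_both {b : List Char}
    (hc : PySem.Chars.endswith b pvCompatV1 = true) :
    PySem.Chars.endswith b pvChatComp = false := by
  by_contra h
  have h' : PySem.Chars.endswith b pvChatComp = true := by
    simpa using h
  have e1 := pvEndswith_getLast? hc (by decide)
  have e2 := pvEndswith_getLast? h' (by decide)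
  rw [e1] at e2
  revert e2; decide

-- main invariant: A's recursion computes loop-then-post on the normalized string
theorem dash_main : ∀ (n : Nat) (cs : List Char), cs.length ≤ n →
    dashscope_api_url_chars cs =
      dash_post (dash_loop (pvRstripSlash (PySem.Chars.strip cs))) := by
  intro n
  induction n with
  | zero =>
    intro cs h
    have : cs = [] := List.eq_nil_of_length_eq_zero (Nat.le_zero.1 h)
    subst this
    rw [dashscope_api_url_chars, dash_loop, dash_post]
    simp [PySem.Chars.strip, PySem.Chars.lstrip, PySem.Chars.rstrip, pvRstripSlash,
      PySem.Chars.endswith, pvChatComp]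
  | succ n ih =>
    intro cs hlen
    rw [dashscope_api_url_chars]
    set b := pvRstripSlash (PySem.Chars.strip cs) with hbdef
    by_cases hnil : b = []
    · rw [dash_loop, dash_post]
      simp [hnil, PySem.Chars.endswith, pvChatComp]
    · by_cases hc : PySem.Chars.endswith b pvCompatV1 = true
      · rw [dash_loop, dash_post]
        simp [hnil, hc, pv_not_both hc]
      · by_cases hch : PySem.Chars.endswith b pvChatComp = true
        · -- both sides take one peeling step; the recursive call is the IH
          have hb : b.length ≤ cs.length :=
            le_trans (pvRstripSlash_length_le _) (pvStrip_length_le _)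
          have hpos : 0 < b.length := List.length_pos_of_ne_nil hnil
          have harg : (PySem.List.slice b none (some (-17))).length ≤ n := by
            rw [PySem.List.slice_to_neg_ofNat _ 17 (by omega)]
            simp only [List.length_take]
            omega
          have ihc := ih (PySem.List.slice b none (some (-17))) harg
          rw [dash_loop]
          simp only [hch, if_true, if_neg hc, if_neg hnil]
          exact ihc
        · rw [dash_loop, dash_post]
          simp [hnil, hc, hch]

-- ===== VERDICT (by name: the statement is the Claim_ definition above) =====
theorem dashscope_api_url_py_spec : Claim_equal_dashscope_api_url_py := by
  intro base_url _
  unfold Spec_dashscope_api_url_py dashscope_api_url_py dashscope_api_url_py_alt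
  exact dash_main base_url.toList.length base_url.toList le_rfl
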